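-- pv_equiv track=rewrite | github.com/sweetyn/Practices_Python3 | ex_13.py | coutDupChar
-- ===== SOURCE A (Python) =====
-- def coutDupChar(word):
--
--     tempWord = list(word)
--     temDic = dict()
--     result = ""
--
--     for x in tempWord:
--         temDic[x] = temDic.get(x, 0)+1
--
--     for char, val in temDic.items():
--         result += char + str(val)
--
--     return result
-- ===== SOURCE B (Python) =====
-- def coutDupChar(word):
--     tempWord = list(word)
--     seen = set()
--     result = ""
--     for ch in tempWord:
--         if ch not in seen:
--             seen.add(ch)
--             result += ch + str(tempWord.count(ch))
--     return result
-- ===== Notes on version B (the rewrite author's own statement) =====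
-- stated objective: alternative
-- what changed: Replaces the frequency-dict build plus items() pass with a single loop that keeps a set of already-emitted characters and, at each first occurrence, appends the character plus str(tempWord.count(ch)) obtained by rescanning the list.
import Mathlib
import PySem

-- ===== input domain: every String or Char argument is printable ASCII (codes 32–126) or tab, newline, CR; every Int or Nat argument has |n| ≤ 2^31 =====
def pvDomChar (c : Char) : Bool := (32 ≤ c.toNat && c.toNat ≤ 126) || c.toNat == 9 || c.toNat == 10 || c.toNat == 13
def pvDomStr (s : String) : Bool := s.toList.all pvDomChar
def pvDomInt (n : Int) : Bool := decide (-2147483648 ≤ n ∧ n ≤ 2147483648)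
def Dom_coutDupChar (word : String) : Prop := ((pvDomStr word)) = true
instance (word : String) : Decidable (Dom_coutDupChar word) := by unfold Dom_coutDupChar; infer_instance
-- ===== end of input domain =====

-- B replaces the frequency dict by a one-pass loop with a seen-set and per-first-occurrence rescans (.count): alternative decomposition, same result.

-- ===== PORT A =====
def coutDupChar (word : String) : String :=
  let tempWord : List Char := word.toList
  let temDic : PySem.Dict Char Int :=
    tempWord.foldl (fun d x => d.insert x (d.getD x 0 + 1)) PySem.Dict.empty
  let result : String :=
    temDic.items.foldl (fun r cv => r ++ (String.singleton cv.1 ++ PySem.Int.toStr cv.2)) ""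
  result

-- ===== PORT B =====
def coutDupChar_alt (word : String) : String :=
  let tempWord : List Char := word.toList
  (tempWord.foldl
    (fun (st : PySem.Set Char × String) ch =>
      if PySem.Set.contains st.1 ch then st
      else (PySem.Set.add st.1 ch,
            st.2 ++ (String.singleton ch ++ PySem.Int.toStr (PySem.List.count tempWord ch))))
    (PySem.Set.empty, "")).2

-- ===== PRECONDITION & SPEC =====
def Spec_coutDupChar (word : String) (out : String) : Prop := out = coutDupChar_alt word
instance (word : String) (out : String) : Decidable (Spec_coutDupChar word out) := by unfold Spec_coutDupChar; infer_instance

-- ===== CLAIM (what is proved, stated in full; the proofs are below) =====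
def Claim_equal_coutDupChar : Prop := ∀ (word : String), Dom_coutDupChar word → Spec_coutDupChar word (coutDupChar word)

-- ===== LEMMAS AND PROOFS =====

-- concatenation of f over a list of chars (proof-side normal form for both ports)
def pvCat (f : Char → String) : List Char → String
  | [] => ""
  | c :: t => f c ++ pvCat f t

theorem pvCat_foldl (f : Char → String) :
    ∀ (l : List Char) (r : String), l.foldl (fun r c => r ++ f c) r = r ++ pvCat f l := by
  intro l
  induction l with
  | nil => intro r; simp [pvCat]
  | cons c t ih =>
      intro r; simp only [List.foldl_cons, pvCat, ih, String.append_assoc]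

theorem pvSet_foldl_add_append :
    ∀ (xs : List Char) (s : PySem.Set Char), ∃ t : List Char, xs.foldl PySem.Set.add s = s ++ t := by
  intro xs
  induction xs with
  | nil => intro s; exact ⟨[], by simp⟩
  | cons x t ih =>
      intro s
      by_cases h : x ∈ s
      · obtain ⟨u, hu⟩ := ih s
        refine ⟨u, ?_⟩
        simp only [List.foldl_cons]
        rw [show PySem.Set.add s x = s from by simp [PySem.Set.add, h]]
        exact hu
      · obtain ⟨u, hu⟩ := ih (s ++ [x])
        refine ⟨x :: u, ?_⟩
        simp only [List.foldl_cons]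
        rw [show PySem.Set.add s x = s ++ [x] from by simp [PySem.Set.add, h]]
        simpa using hu

theorem pvB_loop (f : Char → String) :
    ∀ (xs : List Char) (s : PySem.Set Char) (r : String),
      (xs.foldl
        (fun (st : PySem.Set Char × String) ch =>
          if PySem.Set.contains st.1 ch then st
          else (PySem.Set.add st.1 ch, st.2 ++ f ch)) (s, r)).2
      = r ++ pvCat f ((xs.foldl PySem.Set.add s).drop s.length) := by
  intro xs
  induction xs with
  | nil => intro s r; simp [pvCat, List.drop_length]
  | cons x t ih =>
      intro s r
      by_cases h : x ∈ s
      · have hc : PySem.Set.contains s x = true := by simpa using h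
        have hadd : PySem.Set.add s x = s := by simp [PySem.Set.add, h]
        simp only [List.foldl_cons, hc, if_true, hadd]
        exact ih s r
      · have hc : PySem.Set.contains s x = false := by simpa using h
        have hadd : PySem.Set.add s x = s ++ [x] := by simp [PySem.Set.add, h]
        obtain ⟨u, hu⟩ := pvSet_foldl_add_append t (s ++ [x])
        have h1 : (t.foldl PySem.Set.add (s ++ [x])).drop (s ++ [x]).length = u := by
          rw [hu]; exact List.drop_left
        have h2 : (t.foldl PySem.Set.add (s ++ [x])).drop s.length = x :: u := by
          rw [hu, List.append_assoc]
          simp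
        simp only [List.foldl_cons, hc, Bool.false_eq_true, if_false, hadd]
        rw [ih (s ++ [x]) (r ++ f x), h1, h2]
        simp [pvCat, String.append_assoc]

-- ===== VERDICT (by name: the statement is the Claim_ definition above) =====
theorem coutDupChar_spec : Claim_equal_coutDupChar := by
  intro word _
  unfold Spec_coutDupChar coutDupChar coutDupChar_alt
  simp only [PySem.Dict.foldl_insert_getD_add_one_eq_counter, PySem.Dict.items_counter,
    List.foldl_map, pvCat_foldl]
  rw [pvB_loop (fun ch => String.singleton ch ++ PySem.Int.toStr (PySem.List.count word.toList ch))
      word.toList PySem.Set.empty ""]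
  simp [PySem.Set.ofList_eq_foldl, PySem.Set.empty, PySem.List.count_eq]
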